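-- pv_equiv track=rewrite | github.com/ediosyncratic/study.py | crypt/mime.py | quotedPrintableEncode
-- ===== SOURCE A (Python) =====
-- def quotedPrintableEncode(text, avoid='', cols=70, upper=False):
--     r"""Encode text using quoted printable.
--
--     Single required argument is the text to encode.  Optional
--     arguments:
--
--       avoid -- a collection of characters to always encode; empty string by default.
--       cols -- maximum separation between newlines in the result; default 70
--
--     By default, all bytes < 32 (space) or > 126 (tilde) are encoded,
--     with the exception of '\n', as is (inevitably) '=' itself.  Any
--     characters supplied in avoid are encoded in addition to these; in
--     particular, you can include '\n' in avoid if you want it encoded,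
--     too.  (Note that any receiver of quoted-printable data needs to be
--     able to cope with '=', '\n' and hex digits.  None the less, you
--     can encode them if you so chose.)  The resulting lines (or line,
--     if you're encoding '\n' itself) are split, with '=\n', whenever
--     they would otherwise have length > cols.
--
--     Note that the output shall use '=', the usual decimal digits and
--     some letters
--     """
--
--     res, size = '', 0
--     while text:
--         b, text = text[:1], text[1:]
--         if b in avoid or b > '~' or b == '=' or (b < ' ' and b != '\n'):
--             t = hex(ord(b))[2:]
--             # hex() returns lower-case by default.
--             if upper: t = t.upper()
--             b = '=' + (2 - len(t)) * '0' + t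
--         if b == '\n': size = 0
--         else: size += len(b)
--         # If b isn't the end of a line, we need space for either
--         # the next character or the '=' that introduces the
--         # line-split that shall precede that next character.
--         if size + (1 if text and not text.startswith('\n') else 0) > cols:
--             res += '=\n'
--             size = len(b)
--         res += b
--     return res
-- ===== SOURCE B (Python) =====
-- def quotedPrintableEncode(text, avoid='', cols=70, upper=False):
--     # Phase 1: per-character encoded tokens (nibble table lookup instead of hex()+pad).
--     _HEX = '0123456789abcdef'
--     tokens = []
--     for ch in text:
--         o = ord(ch)
--         if ch in avoid or o == 61 or o > 126 or (o < 32 and o != 10):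
--             h = _HEX[o >> 4] + _HEX[o & 15]
--             if upper:
--                 h = h.upper()
--             tokens.append('=' + h)
--         else:
--             tokens.append(ch)
--     # Phase 2: single indexed pass with raw-character lookahead; join once.
--     pieces = []
--     size = 0
--     nxts = list(text[1:]) + ['\n']  # '\n' sentinel: no room needed after the last char
--     for tok, nxt in zip(tokens, nxts):
--         size = 0 if tok == '\n' else size + len(tok)
--         if size + (0 if nxt == '\n' else 1) > cols:
--             pieces.append('=\n')
--             size = len(tok)
--         pieces.append(tok)
--     return ''.join(pieces)
-- ===== Notes on version B (the rewrite author's own statement) =====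
-- stated objective: faster
-- what changed: A's single while-loop that encodes, wraps and grows the result by repeated string concatenation is replaced by two distinct phases: a per-character token map using a hex nibble table, then one wrap pass over token/raw-lookahead pairs with a newline sentinel, collected in a list and joined once.
import Mathlib
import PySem

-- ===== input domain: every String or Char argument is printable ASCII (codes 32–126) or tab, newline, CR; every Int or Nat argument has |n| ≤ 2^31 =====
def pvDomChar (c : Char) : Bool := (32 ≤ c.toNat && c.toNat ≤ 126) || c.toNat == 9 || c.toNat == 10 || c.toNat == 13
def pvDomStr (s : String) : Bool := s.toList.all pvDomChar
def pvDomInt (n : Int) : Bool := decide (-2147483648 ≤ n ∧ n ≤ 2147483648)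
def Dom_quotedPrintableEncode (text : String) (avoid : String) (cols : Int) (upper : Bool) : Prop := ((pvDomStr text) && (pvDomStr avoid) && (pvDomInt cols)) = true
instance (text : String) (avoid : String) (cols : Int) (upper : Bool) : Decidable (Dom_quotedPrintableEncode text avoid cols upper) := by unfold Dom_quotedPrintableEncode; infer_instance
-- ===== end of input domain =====

-- B re-implements A's single accumulating while-loop as two distinct passes (a per-character
-- token map using a nibble table, then one wrap-and-join pass with a sentinel lookahead);
-- objective: faster (tokens collected in a list, joined once, instead of repeated string concatenation).

-- ===== PORT A =====
-- A's inline encoding of one character: hex(ord(b))[2:], optional .upper(), zero-pad to 2.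
-- Nat.toDigits 16 is Python's hex(n)[2:] for n ≥ 0 (lower-case digits), exact on Dom chars.
def qpeTokA (avoid : List Char) (upper : Bool) (c : Char) : List Char :=
  if avoid.contains c = true ∨ '~' < c ∨ c = '=' ∨ (c < ' ' ∧ c ≠ '\n') then
    let t := Nat.toDigits 16 c.toNat
    let t := if upper then PySem.Chars.upper t else t
    '=' :: (List.replicate (2 - t.length) '0' ++ t)
  else [c]

-- A's while-loop: peel one character, encode, update size, maybe insert '=\n', append to res.
def qpeLoopA (avoid : List Char) (cols : Int) (upper : Bool) :
    List Char → List Char → Int → List Char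
  | [], res, _ => res
  | c :: text, res, size =>
    let b := qpeTokA avoid upper c
    let size' := if b = ['\n'] then 0 else size + (b.length : Int)
    if size' + (if text ≠ [] ∧ text.head? ≠ some '\n' then (1:Int) else 0) > cols then
      qpeLoopA avoid cols upper text (res ++ ('=' :: '\n' :: b)) (b.length : Int)
    else
      qpeLoopA avoid cols upper text (res ++ b) size'

def quotedPrintableEncode (text : String) (avoid : String) (cols : Int) (upper : Bool) : String :=
  String.ofList (qpeLoopA avoid.toList cols upper text.toList [] 0)

-- ===== PORT B =====
def pvHexDigits : List Char := ['0','1','2','3','4','5','6','7','8','9','a','b','c','d','e','f']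

-- B phase 1: token for one character via nibble-table lookup (_HEX[o >> 4], _HEX[o & 15]).
-- List.getD is exact for the in-range indices Python reaches on Dom chars (o ≤ 126).
def qpeTokB (avoid : List Char) (upper : Bool) (c : Char) : List Char :=
  let o := c.toNat
  if avoid.contains c = true ∨ o = 61 ∨ 126 < o ∨ (o < 32 ∧ o ≠ 10) then
    let h := [pvHexDigits.getD (o >>> 4) '0', pvHexDigits.getD (o &&& 15) '0']
    let h := if upper then PySem.Chars.upper h else h
    '=' :: h
  else [c]

-- B phase 2: one pass over (token, raw lookahead char) pairs, emitting pieces front-to-back.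
def qpeLoopB (cols : Int) : List (List Char × Char) → Int → List Char
  | [], _ => []
  | (tok, nxt) :: rest, size =>
    let size' := if tok = ['\n'] then 0 else size + (tok.length : Int)
    if size' + (if nxt = '\n' then (0:Int) else 1) > cols then
      ('=' :: '\n' :: tok) ++ qpeLoopB cols rest (tok.length : Int)
    else
      tok ++ qpeLoopB cols rest size'

def quotedPrintableEncode_alt (text : String) (avoid : String) (cols : Int) (upper : Bool) : String :=
  let tl := text.toList
  let tokens := tl.map (qpeTokB avoid.toList upper)
  let nxts := tl.drop 1 ++ ['\n']
  String.ofList (qpeLoopB cols (tokens.zip nxts) 0)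

-- ===== PRECONDITION & SPEC =====
def Spec_quotedPrintableEncode (text : String) (avoid : String) (cols : Int) (upper : Bool) (out : String) : Prop := out = quotedPrintableEncode_alt text avoid cols upper
instance (text : String) (avoid : String) (cols : Int) (upper : Bool) (out : String) : Decidable (Spec_quotedPrintableEncode text avoid cols upper out) := by unfold Spec_quotedPrintableEncode; infer_instance

-- ===== CLAIM (what is proved, stated in full; the proofs are below) =====
def Claim_equal_quotedPrintableEncode : Prop := ∀ (text : String) (avoid : String) (cols : Int) (upper : Bool), Dom_quotedPrintableEncode text avoid cols upper → Spec_quotedPrintableEncode text avoid cols upper (quotedPrintableEncode text avoid cols upper)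

-- ===== LEMMAS AND PROOFS =====

lemma pv_char_lt_iff (c d : Char) : c < d ↔ c.toNat < d.toNat := by
  rw [Char.lt_def, UInt32.lt_iff_toNat_lt]; rfl

lemma pv_char_eq_iff (c d : Char) : c = d ↔ c.toNat = d.toNat := by
  constructor
  · rintro rfl; rfl
  · intro h; exact Char.ext (UInt32.toNat_inj.mp h)

lemma pv_hex_eq : ∀ o : Nat, o < 128 → ∀ u : Bool,
    (let t := Nat.toDigits 16 o
     let t := if u then PySem.Chars.upper t else t
     ('=' :: (List.replicate (2 - t.length) '0' ++ t)))
    = ('=' :: (let h := [pvHexDigits.getD (o >>> 4) '0', pvHexDigits.getD (o &&& 15) '0']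
               if u then PySem.Chars.upper h else h)) := by decide

lemma pv_tok_eq (avoid : List Char) (u : Bool) (c : Char) (h : pvDomChar c = true) :
    qpeTokA avoid u c = qpeTokB avoid u c := by
  have hdom : 32 ≤ c.toNat ∧ c.toNat ≤ 126 ∨ c.toNat = 9 ∨ c.toNat = 10 ∨ c.toNat = 13 := by
    have := h
    simp [pvDomChar, Bool.or_eq_true, Bool.and_eq_true] at this
    tauto
  have e1 : '~'.toNat = 126 := by decide
  have e2 : ' '.toNat = 32 := by decide
  have e3 : '='.toNat = 61 := by decide
  have e4 : '\n'.toNat = 10 := by decide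
  have hiff : (avoid.contains c = true ∨ '~' < c ∨ c = '=' ∨ (c < ' ' ∧ c ≠ '\n'))
      ↔ (avoid.contains c = true ∨ c.toNat = 61 ∨ 126 < c.toNat ∨ (c.toNat < 32 ∧ c.toNat ≠ 10)) := by
    simp only [ne_eq, pv_char_lt_iff, pv_char_eq_iff c '=', pv_char_eq_iff c '\n', e1, e2, e3, e4]
    tauto
  unfold qpeTokA qpeTokB
  by_cases hc : avoid.contains c = true ∨ c.toNat = 61 ∨ 126 < c.toNat ∨ (c.toNat < 32 ∧ c.toNat ≠ 10)
  · rw [if_pos (hiff.mpr hc), if_pos hc]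
    exact pv_hex_eq c.toNat (by omega) u
  · rw [if_neg (fun hx => hc (hiff.mp hx)), if_neg hc]

lemma pv_loop_eq (avoid : List Char) (cols : Int) (u : Bool) :
    ∀ (text res : List Char) (size : Int),
      (∀ c ∈ text, pvDomChar c = true) →
      qpeLoopA avoid cols u text res size =
        res ++ qpeLoopB cols ((text.map (qpeTokB avoid u)).zip (text.drop 1 ++ ['\n'])) size := by
  intro text
  induction text with
  | nil => intro res size _; simp [qpeLoopA, qpeLoopB]
  | cons c rest ih =>
    intro res size hdom
    have hc : pvDomChar c = true := hdom c (List.mem_cons_self ..)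
    have hrest : ∀ x ∈ rest, pvDomChar x = true := fun x hx => hdom x (List.mem_cons_of_mem _ hx)
    have hzip : ((c :: rest).map (qpeTokB avoid u)).zip ((c :: rest).drop 1 ++ ['\n'])
        = (qpeTokB avoid u c, rest.headD '\n')
            :: (rest.map (qpeTokB avoid u)).zip (rest.drop 1 ++ ['\n']) := by
      cases rest <;> simp [List.zip]
    have hlk : (if rest ≠ [] ∧ rest.head? ≠ some '\n' then (1:Int) else 0)
        = (if rest.headD '\n' = '\n' then (0:Int) else 1) := by
      cases rest with
      | nil => simp
      | cons r rs => by_cases hr : r = '\n' <;> simp [hr]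
    rw [hzip]
    show qpeLoopA avoid cols u (c :: rest) res size = _
    rw [qpeLoopA, pv_tok_eq avoid u c hc, hlk, qpeLoopB]
    set b := qpeTokB avoid u c with hb
    set size' := if b = ['\n'] then (0:Int) else size + (b.length : Int) with hs
    by_cases hcond : cols < size' + (if rest.headD '\n' = '\n' then (0:Int) else 1)
    · rw [if_pos hcond, if_pos hcond, ih _ _ hrest]; simp
    · rw [if_neg hcond, if_neg hcond, ih _ _ hrest]; simp

-- ===== VERDICT (by name: the statement is the Claim_ definition above) =====
theorem quotedPrintableEncode_spec : Claim_equal_quotedPrintableEncode := by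
  intro text avoid cols upper hdom
  unfold Spec_quotedPrintableEncode quotedPrintableEncode quotedPrintableEncode_alt
  have htext : ∀ c ∈ text.toList, pvDomChar c = true := by
    have : pvDomStr text = true := by
      unfold Dom_quotedPrintableEncode at hdom
      simp [Bool.and_eq_true] at hdom
      exact hdom.1.1
    simpa [pvDomStr, List.all_eq_true] using this
  rw [pv_loop_eq avoid.toList cols upper text.toList [] 0 htext]
  simp
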